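-- pv_equiv track=rewrite | github.com/luolinhan/investment-decision-system | app/services/investment_db_service.py | _nearest_value_by_date
-- ===== SOURCE A (Python) =====
-- from typing import Dict, List, Any, Optional
--
-- def _nearest_value_by_date(
--
--     date_list: List[str],
--     mapping: Dict[str, Dict[str, Any]],
--     fallback: Optional[Dict[str, Any]] = None,
-- ) -> Dict[str, Dict[str, Any]]:
--     if not date_list:
--         return {}
--     fallback = fallback or {}
--     sorted_keys = sorted(mapping.keys())
--     result: Dict[str, Dict[str, Any]] = {}
--     for date_str in date_list:
--         chosen = fallback
--         for key in sorted_keys: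
--             if key <= date_str:
--                 chosen = mapping[key]
--             else:
--                 break
--         result[date_str] = dict(chosen)
--     return result
-- ===== SOURCE B (Python) =====
-- from bisect import bisect_right
-- from typing import Dict, List, Any, Optional
--
-- def _nearest_value_by_date(
--     date_list: List[str],
--     mapping: Dict[str, Dict[str, Any]],
--     fallback: Optional[Dict[str, Any]] = None,
-- ) -> Dict[str, Dict[str, Any]]:
--     if not date_list:
--         return {}
--     fb = fallback or {}
--     keys = sorted(mapping.keys())
--     result: Dict[str, Dict[str, Any]] = {}
--     for date_str in date_list:
--         i = bisect_right(keys, date_str)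
--         result[date_str] = dict(fb if i == 0 else mapping[keys[i - 1]])
--     return result
-- ===== Notes on version B (the rewrite author's own statement) =====
-- stated objective: faster
-- what changed: replaces A's per-date linear scan over all sorted keys with a binary search (bisect_right) per date, picking keys[i-1] directly
import Mathlib
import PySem

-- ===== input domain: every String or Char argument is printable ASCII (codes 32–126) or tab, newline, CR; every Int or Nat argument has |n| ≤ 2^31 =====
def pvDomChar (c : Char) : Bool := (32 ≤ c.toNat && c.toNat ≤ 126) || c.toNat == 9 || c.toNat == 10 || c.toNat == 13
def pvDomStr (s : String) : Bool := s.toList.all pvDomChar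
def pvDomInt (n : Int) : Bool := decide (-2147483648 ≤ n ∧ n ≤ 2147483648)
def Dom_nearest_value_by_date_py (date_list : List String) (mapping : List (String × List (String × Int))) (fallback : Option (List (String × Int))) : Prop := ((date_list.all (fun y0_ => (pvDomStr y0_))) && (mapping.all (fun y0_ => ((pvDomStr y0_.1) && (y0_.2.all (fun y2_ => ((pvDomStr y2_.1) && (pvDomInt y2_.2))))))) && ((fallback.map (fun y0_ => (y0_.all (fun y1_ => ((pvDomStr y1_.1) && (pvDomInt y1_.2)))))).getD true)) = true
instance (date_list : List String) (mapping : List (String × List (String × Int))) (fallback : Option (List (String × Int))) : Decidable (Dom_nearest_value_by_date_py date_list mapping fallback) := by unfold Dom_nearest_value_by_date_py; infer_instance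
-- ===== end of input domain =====

-- B replaces A's per-date linear scan over the sorted keys with a binary search
-- (bisect_right) per date; objective: faster (asymptotically fewer comparisons per date).


-- ===== PORT A =====
-- inner 'for key in sorted_keys' loop with its break; 'mapping[key]' is total here because
-- key comes from mapping's own keys, so it is ported as getD with an unreachable default.
def scanA (m : PySem.Dict String (List (String × Int))) (d : String) :
    List String → List (String × Int) → List (String × Int)
  | [], chosen => chosen
  | k :: ks, chosen => if k ≤ d then scanA m d ks (m.getD k []) else chosen

-- 'dict(chosen)' copies a dict it received as a dict: identity on the representation.
def nearest_value_by_date_py (date_list : List String) (mapping : List (String × List (String × Int))) (fallback : Option (List (String × Int))) : List (String × List (String × Int)) :=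
  if date_list = [] then []
  else
    let fb := fallback.getD []        -- fallback = fallback or {}
    let m := PySem.Dict.mk mapping
    let sorted_keys := PySem.List.sorted (PySem.Dict.keys m) (fun k => k)
    (date_list.foldl (fun r d => r.insert d (scanA m d sorted_keys fb)) PySem.Dict.empty).items

-- ===== PORT B =====
-- 'keys[i-1]' is in range because 0 < i ≤ len(keys); ported as getD with an unreachable default.
def nearest_value_by_date_py_alt (date_list : List String) (mapping : List (String × List (String × Int))) (fallback : Option (List (String × Int))) : List (String × List (String × Int)) :=
  if date_list = [] then []
  else
    let fb := fallback.getD []        -- fb = fallback or {}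
    let m := PySem.Dict.mk mapping
    let keys := PySem.List.sorted (PySem.Dict.keys m) (fun k => k)
    (date_list.foldl (fun r d =>
        let i := PySem.List.bisectRight keys d
        r.insert d (if i = 0 then fb else m.getD (keys.getD (i - 1) "") [])) PySem.Dict.empty).items

-- ===== PRECONDITION & SPEC =====
def Spec_nearest_value_by_date_py (date_list : List String) (mapping : List (String × List (String × Int))) (fallback : Option (List (String × Int))) (out : List (String × List (String × Int))) : Prop := out = nearest_value_by_date_py_alt date_list mapping fallback
instance (date_list : List String) (mapping : List (String × List (String × Int))) (fallback : Option (List (String × Int))) (out : List (String × List (String × Int))) : Decidable (Spec_nearest_value_by_date_py date_list mapping fallback out) := by unfold Spec_nearest_value_by_date_py; infer_instance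

-- ===== CLAIM (what is proved, stated in full; the proofs are below) =====
def Claim_equal_nearest_value_by_date_py : Prop := ∀ (date_list : List String) (mapping : List (String × List (String × Int))) (fallback : Option (List (String × Int))), Dom_nearest_value_by_date_py date_list mapping fallback → Spec_nearest_value_by_date_py date_list mapping fallback (nearest_value_by_date_py date_list mapping fallback)

-- ===== LEMMAS AND PROOFS =====

-- general bisectRight correctness on a sorted List String (PySem's bisectRight_spec is stated for Int)
theorem bisectLoop_spec_str (xs : List String) (x : String)
    (hsort : List.Pairwise (· ≤ ·) xs) :
    ∀ (fuel lo hi : Nat), lo ≤ hi → hi ≤ xs.length → hi - lo ≤ fuel →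
    (∀ j (hj : j < xs.length), j < lo → xs[j] ≤ x) →
    (∀ j (hj : j < xs.length), hi ≤ j → x < xs[j]) →
    (∀ j (hj : j < xs.length), j < PySem.List.bisectRightLoop xs x fuel lo hi → xs[j] ≤ x) ∧
    (∀ j (hj : j < xs.length), PySem.List.bisectRightLoop xs x fuel lo hi ≤ j → x < xs[j]) ∧
    PySem.List.bisectRightLoop xs x fuel lo hi ≤ xs.length := by
  intro fuel
  induction fuel with
  | zero =>
    intro lo hi hlh hhl hf h1 h2
    have : hi = lo := by omega
    subst this
    rw [show PySem.List.bisectRightLoop xs x 0 hi hi = hi from rfl]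
    exact ⟨h1, h2, hhl⟩
  | succ n ih =>
    intro lo hi hlh hhl hf h1 h2
    by_cases hlt : lo < hi
    · have hmidlt : (lo + hi) / 2 < xs.length := by omega
      have hmid : xs[(lo + hi) / 2]? = some xs[(lo + hi) / 2] := by
        simp [List.getElem?_eq_getElem hmidlt]
      rw [show PySem.List.bisectRightLoop xs x (n+1) lo hi =
          if x < xs[(lo + hi) / 2] then PySem.List.bisectRightLoop xs x n lo ((lo + hi) / 2)
          else PySem.List.bisectRightLoop xs x n ((lo + hi) / 2 + 1) hi from by
        simp [PySem.List.bisectRightLoop, hlt, hmid]]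
      have hmono := List.pairwise_iff_getElem.mp hsort
      by_cases hx : x < xs[(lo + hi) / 2]
      · rw [if_pos hx]
        refine ih lo ((lo + hi) / 2) (by omega) (by omega) (by omega) h1 ?_
        intro j hj hji
        rcases Nat.eq_or_lt_of_le hji with h | h
        · exact h ▸ hx
        · exact lt_of_lt_of_le hx (hmono _ _ hmidlt hj h)
      · rw [if_neg hx]
        refine ih ((lo + hi) / 2 + 1) hi (by omega) hhl (by omega) ?_ h2
        intro j hj hji
        have hjm : j ≤ (lo + hi) / 2 := by omega
        rcases Nat.eq_or_lt_of_le hjm with h | h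
        · have he : xs[j] = xs[(lo + hi) / 2] := by congr 1
          rw [he]; exact le_of_not_gt hx
        · exact le_trans (hmono _ _ hj hmidlt h) (le_of_not_gt hx)
    · have : hi = lo := by omega
      subst this
      rw [show PySem.List.bisectRightLoop xs x (n+1) hi hi = hi from by
        simp [PySem.List.bisectRightLoop]]
      exact ⟨h1, h2, hhl⟩

theorem bisectRight_spec_str (xs : List String) (x : String)
    (hsort : List.Pairwise (· ≤ ·) xs) :
    (∀ j (hj : j < xs.length), j < PySem.List.bisectRight xs x → xs[j] ≤ x) ∧
    (∀ j (hj : j < xs.length), PySem.List.bisectRight xs x ≤ j → x < xs[j]) ∧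
    PySem.List.bisectRight xs x ≤ xs.length := by
  have h := bisectLoop_spec_str xs x hsort xs.length 0 xs.length (Nat.zero_le _) (le_refl _)
    (by omega) (by omega) (by intro j hj hji; omega)
  exact h

-- the break-scan of A returns the value at the last element of (takeWhile (≤ d))
theorem scanA_eq_takeWhile (m : PySem.Dict String (List (String × Int))) (d : String) :
    ∀ (ks : List String) (chosen : List (String × Int)),
      scanA m d ks chosen =
        match (ks.takeWhile (fun k => decide (k ≤ d))).getLast? with
        | none => chosen
        | some k => m.getD k [] := by
  intro ks
  induction ks with
  | nil => intro chosen; rw [scanA]; rfl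
  | cons k ks ih =>
    intro chosen
    rw [scanA]
    by_cases hk : k ≤ d
    · rw [if_pos hk, ih]
      have ht : List.takeWhile (fun k => decide (k ≤ d)) (k :: ks) =
          k :: List.takeWhile (fun k => decide (k ≤ d)) ks := by
        simp only [List.takeWhile_cons, decide_eq_true hk, if_true]
      rw [ht, List.getLast?_cons]
      cases (List.takeWhile (fun k => decide (k ≤ d)) ks).getLast? with
      | none => rfl
      | some k' => rfl
    · rw [if_neg hk]
      have ht : List.takeWhile (fun k => decide (k ≤ d)) (k :: ks) = [] := by
        simp only [List.takeWhile_cons, decide_eq_false hk, Bool.false_eq_true, if_false]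
      rw [ht]
      rfl

-- takeWhile = take i when the first i elements satisfy p and element i (if any) does not
theorem takeWhile_eq_take_of (p : String → Bool) :
    ∀ (xs : List String) (i : Nat), i ≤ xs.length →
    (∀ j (hj : j < xs.length), j < i → p xs[j] = true) →
    (∀ j (hj : j < xs.length), i ≤ j → p xs[j] = false) →
    xs.takeWhile p = xs.take i := by
  intro xs
  induction xs with
  | nil => intro i _ _ _; simp
  | cons x xs ih =>
    intro i hil h1 h2
    cases i with
    | zero =>
      have hp : p x = false := by simpa using h2 0 (by simp) (Nat.zero_le _)
      simp [hp]
    | succ i' =>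
      have hp : p x = true := by simpa using h1 0 (by simp) (Nat.succ_pos _)
      rw [List.takeWhile_cons, if_pos hp, List.take_succ_cons]
      congr 1
      refine ih i' (by simpa using hil) ?_ ?_
      · intro j hj hji
        simpa using h1 (j + 1) (by simpa using Nat.succ_lt_succ hj) (Nat.succ_lt_succ hji)
      · intro j hj hji
        simpa using h2 (j + 1) (by simpa using Nat.succ_lt_succ hj) (Nat.succ_le_succ hji)

-- the "last of take i" dispatch equals B's if-on-the-bisect-index form
theorem take_last_case (m : PySem.Dict String (List (String × Int)))
    (ks : List String) (fb : List (String × Int)) (i : Nat) (hlen : i ≤ ks.length) :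
    (match (ks.take i).getLast? with
     | none => fb
     | some k => m.getD k []) =
    (if i = 0 then fb else m.getD (ks.getD (i - 1) "") []) := by
  cases i with
  | zero => rfl
  | succ i' =>
    have hi'lt : i' < ks.length := by omega
    have hlast : (ks.take (i' + 1)).getLast? = some ks[i'] := by
      rw [List.getLast?_eq_getElem?]
      have hl : (ks.take (i' + 1)).length = i' + 1 := by
        simp [List.length_take]; omega
      rw [hl]
      simp [List.getElem?_eq_getElem hi'lt]
    rw [hlast]
    have hd : ks.getD (i' + 1 - 1) "" = ks[i'] := by
      simp [List.getD_eq_getElem?_getD, List.getElem?_eq_getElem hi'lt]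
    rw [hd]
    rfl

-- per-date: A's scan value = B's bisect value, on a sorted key list
theorem scan_eq_bisect (m : PySem.Dict String (List (String × Int))) (d : String)
    (ks : List String) (hsort : List.Pairwise (· ≤ ·) ks) (fb : List (String × Int)) :
    scanA m d ks fb =
      (if PySem.List.bisectRight ks d = 0 then fb
       else m.getD (ks.getD (PySem.List.bisectRight ks d - 1) "") []) := by
  obtain ⟨hlt, hge, hlen⟩ := bisectRight_spec_str ks d hsort
  have htw : ks.takeWhile (fun k => decide (k ≤ d)) = ks.take (PySem.List.bisectRight ks d) := by
    refine takeWhile_eq_take_of _ ks _ hlen ?_ ?_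
    · intro j hj hji; exact decide_eq_true (hlt j hj hji)
    · intro j hj hji; exact decide_eq_false (not_le_of_gt (hge j hj hji))
  rw [scanA_eq_takeWhile, htw, take_last_case m ks fb _ hlen]

-- ===== VERDICT (by name: the statement is the Claim_ definition above) =====
theorem nearest_value_by_date_py_spec : Claim_equal_nearest_value_by_date_py := by
  intro date_list mapping fallback _
  unfold Spec_nearest_value_by_date_py nearest_value_by_date_py nearest_value_by_date_py_alt
  by_cases h : date_list = []
  · simp [h]
  · simp only [if_neg h]
    congr 1
    apply List.foldl_ext
    intro r d _
    congr 1
    exact scan_eq_bisect _ d _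
      (PySem.List.sorted_pairwise (PySem.Dict.keys (PySem.Dict.mk mapping)) (fun k => k)) _
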